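-- pv_equiv track=rewrite | github.com/Akkodis/amad | amad/tools/pullingFilter.py | pulling_filter
-- ===== SOURCE A (Python) =====
-- def pulling_filter(inwards, outwards, exceptions=[]):
--     """
--     Generates a filtered list of parameters based on the following rules:
--     `Outwards` with the suffix `_out`
--     All `inwards` except for those with corresponding `outwards` suffixed with `_out`
--
--     Parameters
--     ----------
--     inwards : list
--         CoSApp list of inwards (`system_name.inwards`)
--     outwards : list
--         CoSApp list of outwards (`system_name.outwards`)
--     """
--
--     # outwards where _out is present
--     filtered_outwards = [out for out in outwards if "_out" in out]
--
--     # all inwards except the _out related ones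
--     root_outwards = [out.removesuffix("_out") for out in filtered_outwards]
--     filtered_inwards = [inw for inw in inwards if inw not in root_outwards]
--
--     all_pulling = filtered_inwards + filtered_outwards
--
--     for exception in exceptions:
--         try:
--             all_pulling.remove(exception)
--         except ValueError:
--             next
--
--     return all_pulling
-- ===== SOURCE B (Python) =====
-- def pulling_filter(inwards, outwards, exceptions=[]):
--     filtered_outwards = [out for out in outwards if "_out" in out]
--     root_outwards = [out.removesuffix("_out") for out in filtered_outwards]
--     filtered_inwards = [inw for inw in inwards if inw not in root_outwards]
--
--     # single pass: count the exceptions once, then keep each element unless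
--     # its remaining exception budget is positive (decrementing it).
--     counts = {}
--     for e in exceptions:
--         counts[e] = counts.get(e, 0) + 1
--
--     result = []
--     for x in filtered_inwards + filtered_outwards:
--         if counts.get(x, 0) > 0:
--             counts[x] = counts.get(x, 0) - 1
--         else:
--             result.append(x)
--     return result
-- ===== Notes on version B (the rewrite author's own statement) =====
-- stated objective: faster
-- what changed: The per-exception list.remove rescan loop is replaced by counting the exceptions once into a dict and then building the result in a single left-to-right pass that skips each element while its remaining exception count is positive.
import Mathlib
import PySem

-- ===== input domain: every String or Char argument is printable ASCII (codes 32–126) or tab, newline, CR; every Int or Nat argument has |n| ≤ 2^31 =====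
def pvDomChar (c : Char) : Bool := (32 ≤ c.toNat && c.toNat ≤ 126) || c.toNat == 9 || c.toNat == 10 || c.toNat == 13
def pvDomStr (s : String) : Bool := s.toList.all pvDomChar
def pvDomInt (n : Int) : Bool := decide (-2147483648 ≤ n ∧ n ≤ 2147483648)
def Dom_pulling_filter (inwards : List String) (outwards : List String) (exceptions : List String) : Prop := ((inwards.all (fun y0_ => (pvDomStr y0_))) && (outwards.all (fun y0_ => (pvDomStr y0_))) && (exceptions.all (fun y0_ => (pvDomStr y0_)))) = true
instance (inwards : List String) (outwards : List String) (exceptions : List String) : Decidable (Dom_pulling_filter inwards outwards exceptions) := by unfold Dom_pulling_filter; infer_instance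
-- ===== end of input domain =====

-- B replaces A's per-exception list.remove rescan loop by counting the exceptions once
-- and building the result in a single pass (objective: faster on many exceptions).

-- hand port of str.removesuffix(suf): exact — drop the suffix iff the string ends with it
def pyRemovesuffix (s suf : String) : String :=
  if PySem.Str.endswith s suf then String.mk (s.toList.take (s.toList.length - suf.toList.length)) else s

-- ===== PORT A =====
def pulling_filter (inwards : List String) (outwards : List String) (exceptions : List String) : List String :=
  let filtered_outwards := outwards.filter (fun out => PySem.Str.isIn "_out" out)
  let root_outwards := filtered_outwards.map (fun out => pyRemovesuffix out "_out")
  let filtered_inwards := inwards.filter (fun inw => !(root_outwards.contains inw))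
  let all_pulling := filtered_inwards ++ filtered_outwards
  exceptions.foldl (fun l e =>
    match PySem.List.remove? l e with
    | some l' => l'
    | none => l) all_pulling

-- ===== PORT B =====
def pulling_filter_alt (inwards : List String) (outwards : List String) (exceptions : List String) : List String :=
  let filtered_outwards := outwards.filter (fun out => PySem.Str.isIn "_out" out)
  let root_outwards := filtered_outwards.map (fun out => pyRemovesuffix out "_out")
  let filtered_inwards := inwards.filter (fun inw => !(root_outwards.contains inw))
  let counts := exceptions.foldl (fun d e => d.insert e (d.getD e 0 + 1)) PySem.Dict.empty
  let st := (filtered_inwards ++ filtered_outwards).foldl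
    (fun (s : PySem.Dict String Int × List String) x =>
      if s.1.getD x 0 > 0 then (s.1.insert x (s.1.getD x 0 - 1), s.2)
      else (s.1, s.2 ++ [x])) (counts, ([] : List String))
  st.2

-- ===== PRECONDITION & SPEC =====
def Spec_pulling_filter (inwards : List String) (outwards : List String) (exceptions : List String) (out : List String) : Prop := out = pulling_filter_alt inwards outwards exceptions
instance (inwards : List String) (outwards : List String) (exceptions : List String) (out : List String) : Decidable (Spec_pulling_filter inwards outwards exceptions out) := by unfold Spec_pulling_filter; infer_instance

-- ===== CLAIM (what is proved, stated in full; the proofs are below) =====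
def Claim_equal_pulling_filter : Prop := ∀ (inwards : List String) (outwards : List String) (exceptions : List String), Dom_pulling_filter inwards outwards exceptions → Spec_pulling_filter inwards outwards exceptions (pulling_filter inwards outwards exceptions)

-- ===== LEMMAS AND PROOFS =====

-- spec-side model: remove, for each element, up to f(x) first occurrences
def removeF : List String → (String → Int) → List String
  | [], _ => []
  | x :: xs, f => if f x > 0 then removeF xs (Function.update f x (f x - 1)) else x :: removeF xs f

theorem removeF_zero (l : List String) : removeF l (fun _ => (0 : Int)) = l := by
  induction l with
  | nil => rfl
  | cons x xs ih => simp [removeF, ih]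

theorem removeF_step (e : String) (l : List String) (f : String → Int) (hf : ∀ x, 0 ≤ f x) :
    removeF ((PySem.List.remove? l e).getD l) f = removeF l (Function.update f e (f e + 1)) := by
  induction l generalizing f with
  | nil =>
    have : PySem.List.remove? ([] : List String) e = none := by
      simp [PySem.List.remove?_eq_none_iff]
    simp [this, removeF]
  | cons x xs ih =>
    by_cases hx : x = e
    · subst hx
      rw [PySem.List.remove?_cons_self]
      have hpos : Function.update f x (f x + 1) x > 0 := by
        simp [Function.update_self]; linarith [hf x]
      simp only [Option.getD_some, removeF, if_pos hpos]
      have : Function.update (Function.update f x (f x + 1)) x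
          (Function.update f x (f x + 1) x - 1) = f := by
        simp [Function.update_self, Function.update_idem]
      rw [this]
    · rw [PySem.List.remove?_cons_of_ne xs hx]
      have hxe : ((PySem.List.remove? xs e).map (x :: ·)).getD (x :: xs)
          = x :: (PySem.List.remove? xs e).getD xs := by
        cases PySem.List.remove? xs e <;> rfl
      rw [hxe]
      have hfx : Function.update f e (f e + 1) x = f x := Function.update_of_ne hx _ _
      by_cases hb : f x > 0
      · have hf' : ∀ y, 0 ≤ Function.update f x (f x - 1) y := by
          intro y
          rcases eq_or_ne y x with h | h
          · subst h; simp [Function.update_self]; omega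
          · rw [Function.update_of_ne h _ _]; exact hf y
        have hcomm : Function.update (Function.update f x (f x - 1)) e
            (Function.update f x (f x - 1) e + 1)
            = Function.update (Function.update f e (f e + 1)) x
              (Function.update f e (f e + 1) x - 1) := by
          rw [Function.update_of_ne (fun h => hx h.symm) _ _, hfx,
            Function.update_comm (fun h => hx h.symm) _ _ _]
        simp only [removeF, if_pos hb, ih _ hf', hcomm]
        rw [if_pos (show Function.update f e (f e + 1) x > 0 by rw [hfx]; exact hb)]
      · simp only [removeF, if_neg hb, ih f hf]
        rw [if_neg (by rw [hfx]; exact hb)]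

-- A's loop computes removeF with the multiplicities of the exceptions list
theorem loopA_eq (es : List String) (l : List String) :
    es.foldl (fun l e =>
      match PySem.List.remove? l e with
      | some l' => l'
      | none => l) l = removeF l (fun x => (es.count x : Int)) := by
  induction es generalizing l with
  | nil => simp [removeF_zero]
  | cons e es ih =>
    rw [List.foldl_cons, ih]
    have hstep : (match PySem.List.remove? l e with
        | some l' => l'
        | none => l) = (PySem.List.remove? l e).getD l := by
      cases PySem.List.remove? l e <;> rfl
    rw [hstep, removeF_step e l _ (fun x => Int.natCast_nonneg _)]
    congr 1
    funext x
    rcases eq_or_ne x e with h | h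
    · subst h; simp [Function.update_self, List.count_cons]
    · rw [Function.update_of_ne h _ _]
      simp [List.count_cons, Ne.symm h]

-- B's single pass computes removeF with the counts stored in the dict
theorem loopB_eq (l : List String) (d : PySem.Dict String Int) (acc : List String) :
    (l.foldl (fun (s : PySem.Dict String Int × List String) x =>
      if s.1.getD x 0 > 0 then (s.1.insert x (s.1.getD x 0 - 1), s.2)
      else (s.1, s.2 ++ [x])) (d, acc)).2 = acc ++ removeF l (fun x => d.getD x 0) := by
  induction l generalizing d acc with
  | nil => simp [removeF]
  | cons x xs ih =>
    by_cases hb : d.getD x 0 > 0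
    · rw [List.foldl_cons]
      simp only [if_pos hb]
      rw [ih]
      have : (fun y => (d.insert x (d.getD x 0 - 1)).getD y 0)
          = Function.update (fun y => d.getD y 0) x (d.getD x 0 - 1) := by
        funext y
        rw [PySem.Dict.getD_insert, Function.update_apply]
      rw [this]
      simp [removeF, if_pos hb]
    · rw [List.foldl_cons]
      simp only [if_neg hb]
      rw [ih]
      simp [removeF, if_neg hb]

theorem counts_getD (es : List String) (x : String) :
    (es.foldl (fun d e => d.insert e (d.getD e 0 + 1)) PySem.Dict.empty).getD x 0
      = (es.count x : Int) := by
  rw [PySem.Dict.getD_foldl_insert_add_one]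
  simp

-- ===== VERDICT (by name: the statement is the Claim_ definition above) =====
theorem pulling_filter_spec : Claim_equal_pulling_filter := by
  intro inwards outwards exceptions _
  unfold Spec_pulling_filter pulling_filter pulling_filter_alt
  rw [loopA_eq, loopB_eq]
  simp only [counts_getD, List.nil_append]
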